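-- pv_equiv track=rewrite | github.com/Renato776/pysac | base.py | extract_chars
-- ===== SOURCE A (Python) =====
-- def extract_chars(string):
--     chars = ''
--     nums = ''
--     for char in string:
--         if char.isnumeric():
--             nums += char
--         else:
--             chars += char
--     return chars, nums
-- ===== SOURCE B (Python) =====
-- def extract_chars(string):
--     nums = ''.join(c for c in string if c.isnumeric())
--     chars = ''.join(c for c in string if not c.isnumeric())
--     return chars, nums
-- ===== Notes on version B (the rewrite author's own statement) =====
-- stated objective: idiomatic
-- what changed: Replaces the single loop carrying two growing string accumulators with two independent filtering passes combined by str.join.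
import Mathlib
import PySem

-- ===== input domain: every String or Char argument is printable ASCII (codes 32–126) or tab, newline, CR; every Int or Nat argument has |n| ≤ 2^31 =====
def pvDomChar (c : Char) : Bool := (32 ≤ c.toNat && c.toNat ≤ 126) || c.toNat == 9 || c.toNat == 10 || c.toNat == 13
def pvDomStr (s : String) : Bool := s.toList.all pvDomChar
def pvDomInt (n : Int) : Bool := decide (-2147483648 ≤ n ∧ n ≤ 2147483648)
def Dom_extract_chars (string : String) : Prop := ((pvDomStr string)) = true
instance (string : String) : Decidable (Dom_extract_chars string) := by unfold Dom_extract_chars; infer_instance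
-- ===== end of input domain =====

-- B replaces A's single two-accumulator loop with two independent filtering passes (idiomatic join-of-filter).
-- On the ASCII domain, Python's str.isnumeric coincides with PySem.Chars.isdigit ('0'-'9'), used in both ports.

-- ===== PORT A =====
-- one pass, two string accumulators, in-order concatenation
def extract_chars (string : String) : String × String :=
  let (chars, nums) :=
    string.toList.foldl
      (fun (acc : List Char × List Char) char =>
        if PySem.Chars.isdigit char then (acc.1, acc.2 ++ [char])
        else (acc.1 ++ [char], acc.2))
      ([], [])
  (String.mk chars, String.mk nums)

-- ===== PORT B =====
-- two independent filtering passes, joined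
def extract_chars_alt (string : String) : String × String :=
  let nums := String.mk (string.toList.filter (fun c => PySem.Chars.isdigit c))
  let chars := String.mk (string.toList.filter (fun c => !PySem.Chars.isdigit c))
  (chars, nums)

-- ===== PRECONDITION & SPEC =====
def Spec_extract_chars (string : String) (out : String × String) : Prop := out = extract_chars_alt string
instance (string : String) (out : String × String) : Decidable (Spec_extract_chars string out) := by unfold Spec_extract_chars; infer_instance

-- ===== CLAIM (what is proved, stated in full; the proofs are below) =====
def Claim_equal_extract_chars : Prop := ∀ (string : String), Dom_extract_chars string → Spec_extract_chars string (extract_chars string)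

-- ===== LEMMAS AND PROOFS =====
theorem extract_chars_fold (l : List Char) (c n : List Char) :
    l.foldl
      (fun (acc : List Char × List Char) char =>
        if PySem.Chars.isdigit char then (acc.1, acc.2 ++ [char])
        else (acc.1 ++ [char], acc.2))
      (c, n)
    = (c ++ l.filter (fun ch => !PySem.Chars.isdigit ch),
       n ++ l.filter (fun ch => PySem.Chars.isdigit ch)) := by
  induction l generalizing c n with
  | nil => simp
  | cons h t ih =>
    simp only [List.foldl_cons, List.filter_cons]
    by_cases hd : PySem.Chars.isdigit h
    · simp [hd, ih]
    · simp [hd, ih]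

-- ===== VERDICT (by name: the statement is the Claim_ definition above) =====
theorem extract_chars_spec : Claim_equal_extract_chars := by
  intro s _
  unfold Spec_extract_chars extract_chars extract_chars_alt
  simp [extract_chars_fold]
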